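-- pv_equiv track=rewrite | github.com/zhi-nguyen/HIS-AIO | backend/apps/ai_engine/agents/triage_agent/node.py | extract_triage_code
-- ===== SOURCE A (Python) =====
-- def extract_triage_code(text: str) -> str:
--     """
--     Extract triage code từ text.
--
--     Lấy code CUỐI CÙNG được nhắc đến trong text (= kết luận của AI),
--     không lấy code ĐẦU TIÊN (thường từ thinking/giải thích).
--
--     VD: "Đây không phải CODE_RED... → Kết luận: [CODE_GREEN]"
--          → Trả về CODE_GREEN (cuối), không phải CODE_RED (đầu)
--     """
--     codes = ["CODE_BLUE", "CODE_RED", "CODE_YELLOW", "CODE_GREEN"]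
--     text_upper = text.upper()
--
--     # Tìm TẤT CẢ vị trí xuất hiện của các code, lấy code CÓ VỊ TRÍ CUỐI CÙNG
--     last_pos = -1
--     last_code = "CODE_GREEN"  # Default
--
--     for code in codes:
--         # Tìm vị trí cuối cùng của code này trong text
--         pos = text_upper.rfind(code)
--         if pos > last_pos:
--             last_pos = pos
--             last_code = code
--
--     return last_code
-- ===== SOURCE B (Python) =====
-- def extract_triage_code(text: str) -> str:
--     codes = ("CODE_BLUE", "CODE_RED", "CODE_YELLOW", "CODE_GREEN")
--     t = text.upper()
--     last = "CODE_GREEN"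
--     for i in range(len(t)):
--         for code in codes:
--             if t.startswith(code, i):
--                 last = code
--                 break
--     return last
-- ===== Notes on version B (the rewrite author's own statement) =====
-- stated objective: alternative
-- what changed: Replaces four separate rfind backward end-scans with a single left-to-right scan that checks each position for a code match and keeps the last (rightmost) match.
import Mathlib
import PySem

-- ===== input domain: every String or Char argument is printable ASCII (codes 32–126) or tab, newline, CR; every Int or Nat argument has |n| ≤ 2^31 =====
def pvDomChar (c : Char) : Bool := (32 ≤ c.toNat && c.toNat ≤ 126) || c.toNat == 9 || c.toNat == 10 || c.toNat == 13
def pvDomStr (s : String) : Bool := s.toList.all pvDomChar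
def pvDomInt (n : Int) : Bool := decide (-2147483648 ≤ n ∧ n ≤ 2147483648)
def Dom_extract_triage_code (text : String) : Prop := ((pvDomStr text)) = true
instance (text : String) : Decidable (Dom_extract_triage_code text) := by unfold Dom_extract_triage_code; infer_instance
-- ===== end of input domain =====

-- B replaces A's four separate rfind backward scans by a single left-to-right scan
-- keeping the last (rightmost) code match; same result, proved equal on Dom.


-- ===== PORT A =====
-- Literal port of A: text.upper(), then for each of the four codes take rfind and
-- keep the (pos, code) with the strictly larger position; default (-1, "CODE_GREEN").
def extract_triage_code (text : String) : String :=
  let codes : List String := ["CODE_BLUE", "CODE_RED", "CODE_YELLOW", "CODE_GREEN"]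
  let text_upper := PySem.Str.upper text
  let st := codes.foldl (fun (st : Int × String) code =>
      let pos := PySem.Str.rfind text_upper code
      if st.1 < pos then (pos, code) else st) (-1, "CODE_GREEN")
  st.2

-- ===== PORT B =====
-- Literal port of B: one forward pass over the positions of the uppercased text;
-- t.startswith(code, i) is startswith on (t.drop i); the inner for/break is find?.
def extract_triage_code_alt (text : String) : String :=
  let codes : List String := ["CODE_BLUE", "CODE_RED", "CODE_YELLOW", "CODE_GREEN"]
  let t := (PySem.Str.upper text).toList
  (List.range t.length).foldl (fun last i =>
      match codes.find? (fun code => PySem.Chars.startswith (t.drop i) code.toList) with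
      | some code => code
      | none => last) "CODE_GREEN"

-- ===== PRECONDITION & SPEC =====
def Spec_extract_triage_code (text : String) (out : String) : Prop := out = extract_triage_code_alt text
instance (text : String) (out : String) : Decidable (Spec_extract_triage_code text out) := by unfold Spec_extract_triage_code; infer_instance

-- ===== CLAIM (what is proved, stated in full; the proofs are below) =====
def Claim_equal_extract_triage_code : Prop := ∀ (text : String), Dom_extract_triage_code text → Spec_extract_triage_code text (extract_triage_code text)

-- ===== LEMMAS AND PROOFS =====

-- the four codes, and "the first code matching at position i" (B's inner for/break)
def pvCodes : List String := ["CODE_BLUE", "CODE_RED", "CODE_YELLOW", "CODE_GREEN"]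

def pvMAt (l : List Char) (i : Nat) : Option String :=
  pvCodes.find? (fun code => PySem.Chars.startswith (l.drop i) code.toList)

-- at most one of the four codes matches at a given position
lemma pvExcl {t : List Char} {c c' : String} (hc : c ∈ pvCodes) (hc' : c' ∈ pvCodes)
    (h : c.toList <+: t) (h' : c'.toList <+: t) : c = c' := by
  have hpp := List.prefix_or_prefix_of_prefix h h'
  simp only [pvCodes, List.mem_cons, List.not_mem_nil, or_false] at hc hc'
  rcases hc with rfl | rfl | rfl | rfl <;> rcases hc' with rfl | rfl | rfl | rfl <;>
    first | rfl | (exfalso; revert hpp; decide)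

-- rfind.go characterizations
lemma pv_go_eq_neg (s sub : List Char) (j : Nat)
    (h : ∀ i ≤ j, ¬ sub <+: s.drop i) : PySem.Chars.rfind.go s sub j = -1 := by
  induction j with
  | zero =>
      have h0 := h 0 (le_refl 0)
      rw [List.drop_zero] at h0
      simp only [PySem.Chars.rfind.go]
      rw [if_neg (by simpa [List.isPrefixOf_iff_prefix] using h0)]
  | succ j ih =>
      have hj1 := h (j+1) (le_refl _)
      simp only [PySem.Chars.rfind.go] at ih ⊢
      rw [if_neg (by simpa [List.isPrefixOf_iff_prefix] using hj1)]
      exact ih (fun i hi => h i (Nat.le_succ_of_le hi))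

lemma pv_go_pos (s sub : List Char) (i j : Nat) (hij : i ≤ j)
    (hm : sub <+: s.drop i)
    (hmax : ∀ k, i < k → k ≤ j → ¬ sub <+: s.drop k) :
    PySem.Chars.rfind.go s sub j = (i : Int) := by
  induction j with
  | zero =>
      interval_cases i
      rw [List.drop_zero] at hm
      simp only [PySem.Chars.rfind.go]
      rw [if_pos (List.isPrefixOf_iff_prefix.mpr hm)]
      rfl
  | succ j ih =>
      simp only [PySem.Chars.rfind.go]
      by_cases hi : i = j + 1
      · subst hi
        rw [if_pos (List.isPrefixOf_iff_prefix.mpr hm)]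
      · have hnm := hmax (j+1) (by omega) (le_refl _)
        rw [if_neg (by simpa [List.isPrefixOf_iff_prefix] using hnm)]
        exact ih (by omega) (fun k hk hk' => hmax k hk (Nat.le_succ_of_le hk'))

lemma pv_go_match (s sub : List Char) (j : Nat)
    (h : PySem.Chars.rfind.go s sub j ≠ -1) :
    ∃ i : Nat, i ≤ j ∧ PySem.Chars.rfind.go s sub j = (i : Int) ∧ sub <+: s.drop i := by
  induction j with
  | zero =>
      simp only [PySem.Chars.rfind.go] at h ⊢
      by_cases hm : sub.isPrefixOf s
      · exact ⟨0, le_refl _, by rw [if_pos hm]; rfl,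
          by rw [List.drop_zero]; exact List.isPrefixOf_iff_prefix.mp hm⟩
      · rw [if_neg hm] at h; exact absurd rfl h
  | succ j ih =>
      simp only [PySem.Chars.rfind.go] at h ⊢
      by_cases hm : sub.isPrefixOf (s.drop (j+1))
      · exact ⟨j+1, le_refl _, by rw [if_pos hm], List.isPrefixOf_iff_prefix.mp hm⟩
      · rw [if_neg hm] at h ⊢
        obtain ⟨i, hi, he, hp⟩ := ih h
        exact ⟨i, Nat.le_succ_of_le hi, he, hp⟩

-- a nonempty sub never matches at or past the end
lemma pv_no_match_ge (s sub : List Char) (hsub : sub ≠ []) (i : Nat) (hi : s.length ≤ i) :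
    ¬ sub <+: s.drop i := by
  rw [List.drop_eq_nil_of_le hi]
  intro hp
  exact hsub (List.prefix_nil.mp hp)

-- each code is a nonempty string (used through pv_no_match_ge)
lemma pvCodes_ne_nil : ∀ c ∈ pvCodes, c.toList ≠ [] := by decide

-- B's fold: no match anywhere below n keeps the default
lemma pvB_none (l : List Char) (n : Nat) (h : ∀ i < n, pvMAt l i = none) :
    (List.range n).foldl (fun last i =>
      match pvCodes.find? (fun code => PySem.Chars.startswith (l.drop i) code.toList) with
      | some code => code
      | none => last) "CODE_GREEN" = "CODE_GREEN" := by
  induction n with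
  | zero => simp
  | succ n ih =>
      rw [List.range_succ, List.foldl_append]
      have hn := h n (by omega)
      simp only [pvMAt] at hn
      simp only [List.foldl_cons, List.foldl_nil, hn]
      exact ih (fun i hi => h i (by omega))

-- B's fold: the last match wins
lemma pvB_last (l : List Char) (n i : Nat) (c : String) (hin : i < n)
    (hm : pvMAt l i = some c) (hmax : ∀ j, i < j → j < n → pvMAt l j = none) :
    (List.range n).foldl (fun last i =>
      match pvCodes.find? (fun code => PySem.Chars.startswith (l.drop i) code.toList) with
      | some code => code
      | none => last) "CODE_GREEN" = c := by
  induction n with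
  | zero => omega
  | succ n ih =>
      rw [List.range_succ, List.foldl_append]
      simp only [List.foldl_cons, List.foldl_nil]
      by_cases hi : i = n
      · subst hi
        simp only [pvMAt] at hm
        simp only [hm]
      · have hn := hmax n (by omega) (by omega)
        simp only [pvMAt] at hn
        simp only [hn]
        exact ih (by omega) (fun j hj hj' => hmax j hj (by omega))

-- A's fold steps: once every remaining rfind is at most the held position, nothing changes
lemma pvA_keep (l : List Char) (codes : List String) (st : Int × String)
    (h : ∀ c' ∈ codes, PySem.Chars.rfind l c'.toList ≤ st.1) :
    codes.foldl (fun (st : Int × String) code =>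
      if st.1 < PySem.Chars.rfind l code.toList
      then (PySem.Chars.rfind l code.toList, code) else st) st = st := by
  induction codes with
  | nil => rfl
  | cons d rest ih =>
      rw [List.foldl_cons, if_neg (not_lt.mpr (h d (List.mem_cons_self)))]
      exact ih (fun c' hc' => h c' (List.mem_cons_of_mem d hc'))

-- A's fold over the codes, given the code with the strictly maximal rfind
lemma pvA_fold_gen (l : List Char) (codes : List String) (st : Int × String)
    (c : String) (hc : c ∈ codes) (i : Nat)
    (hpos : PySem.Chars.rfind l c.toList = (i : Int)) (hst : st.1 < (i : Int))
    (hlt : ∀ c' ∈ codes, c' ≠ c → PySem.Chars.rfind l c'.toList < (i : Int)) :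
    (codes.foldl (fun (st : Int × String) code =>
      if st.1 < PySem.Chars.rfind l code.toList
      then (PySem.Chars.rfind l code.toList, code) else st) st).2 = c := by
  induction codes generalizing st with
  | nil => exact absurd hc (List.not_mem_nil)
  | cons d rest ih =>
      rw [List.foldl_cons]
      by_cases hd : d = c
      · subst hd
        rw [if_pos (by rw [hpos]; exact hst), hpos]
        rw [pvA_keep l rest ((i : Int), d) (fun c' hc' => by
          by_cases he : c' = d
          · subst he; exact le_of_eq hpos
          · exact le_of_lt (hlt c' (List.mem_cons_of_mem d hc') he))]
      · have hcr : c ∈ rest := by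
          rcases List.mem_cons.mp hc with h | h
          · exact absurd h.symm hd
          · exact h
        have hdlt : PySem.Chars.rfind l d.toList < (i : Int) :=
          hlt d (List.mem_cons_self) hd
        by_cases hstep : st.1 < PySem.Chars.rfind l d.toList
        · rw [if_pos hstep]
          exact ih _ hcr hdlt (fun c' hc' hne => hlt c' (List.mem_cons_of_mem d hc') hne)
        · rw [if_neg hstep]
          exact ih _ hcr hst (fun c' hc' hne => hlt c' (List.mem_cons_of_mem d hc') hne)

-- A's fold when no code occurs anywhere
lemma pvA_fold_none (l : List Char)
    (h : ∀ c ∈ pvCodes, PySem.Chars.rfind l c.toList = -1) :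
    (pvCodes.foldl (fun (st : Int × String) code =>
      if st.1 < PySem.Chars.rfind l code.toList
      then (PySem.Chars.rfind l code.toList, code) else st) (-1, "CODE_GREEN")).2 = "CODE_GREEN" := by
  rw [pvA_keep l pvCodes _ (fun c' hc' => le_of_eq (h c' hc'))]

-- ===== VERDICT (by name: the statement is the Claim_ definition above) =====
theorem extract_triage_code_spec : Claim_equal_extract_triage_code := by
  intro text _
  show extract_triage_code text = extract_triage_code_alt text
  unfold extract_triage_code extract_triage_code_alt
  simp only [PySem.Str.rfind_eq, PySem.Str.toList_upper]
  set l := PySem.Chars.upper text.toList with hl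
  by_cases hex : ∃ i, i < l.length ∧ (pvMAt l i).isSome
  · -- some code occurs; i is the greatest matching position, c its (unique) code
    set P : Nat → Prop := fun i => (pvMAt l i).isSome with hP
    obtain ⟨i0, hi0n, hi0⟩ := hex
    set i := Nat.findGreatest P l.length with hidef
    have hPi : P i := Nat.findGreatest_spec (le_of_lt hi0n) hi0
    have hile : i ≤ l.length := Nat.findGreatest_le l.length
    obtain ⟨c, hc⟩ := Option.isSome_iff_exists.mp hPi
    have hcmem : c ∈ pvCodes := List.mem_of_find?_eq_some hc
    have hcpre : c.toList <+: l.drop i := by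
      have := List.find?_some hc
      exact (PySem.Chars.startswith_iff _ _).mp this
    have hin : i < l.length := by
      rcases Nat.lt_or_ge i l.length with h | h
      · exact h
      · exact absurd hcpre (pv_no_match_ge l c.toList (pvCodes_ne_nil c hcmem) i h)
    have hnomatch : ∀ j, i < j → ∀ c' ∈ pvCodes, ¬ c'.toList <+: l.drop j := by
      intro j hj c' hc' hpre
      rcases Nat.lt_or_ge j l.length with hjn | hjn
      · exact Nat.findGreatest_is_greatest hj (le_of_lt hjn)
          (List.find?_isSome.mpr ⟨c', hc', (PySem.Chars.startswith_iff _ _).mpr hpre⟩)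
      · exact pv_no_match_ge l c'.toList (pvCodes_ne_nil c' hc') j hjn hpre
    have hrc : PySem.Chars.rfind l c.toList = (i : Int) := by
      show PySem.Chars.rfind.go l c.toList l.length = (i : Int)
      exact pv_go_pos l c.toList i l.length hile hcpre
        (fun k hk _ => hnomatch k hk c hcmem)
    have hrlt : ∀ c' ∈ pvCodes, c' ≠ c → PySem.Chars.rfind l c'.toList < (i : Int) := by
      intro c' hc' hne
      show PySem.Chars.rfind.go l c'.toList l.length < (i : Int)
      by_cases hneg : PySem.Chars.rfind.go l c'.toList l.length = -1
      · rw [hneg]; omega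
      · obtain ⟨k, hk, he, hp⟩ := pv_go_match l c'.toList l.length hneg
        rw [he]
        have hki : k ≤ i := by
          by_contra hgt
          exact hnomatch k (by omega) c' hc' hp
        have hkne : k ≠ i := fun h => hne (by subst h; exact pvExcl hc' hcmem hp hcpre)
        exact_mod_cast by omega
    have h0 : ((-1 : Int), "CODE_GREEN").1 < (i : Int) := by
      show (-1:Int) < (i:Int); omega
    have hA := pvA_fold_gen l pvCodes ((-1 : Int), "CODE_GREEN") c hcmem i hrc h0 hrlt
    have hB := pvB_last l l.length i c hin hc (fun j hj hj' => by
      simp only [pvMAt]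
      rw [List.find?_eq_none]
      intro c' hc'
      have hnm := hnomatch j hj c' hc'
      simpa [PySem.Chars.startswith_iff] using hnm)
    simp only [pvCodes] at hA hB
    rw [hA, hB]
  · push_neg at hex
    have hnone : ∀ j, ∀ c' ∈ pvCodes, ¬ c'.toList <+: l.drop j := by
      intro j c' hc' hpre
      rcases Nat.lt_or_ge j l.length with hjn | hjn
      · exact hex j hjn
          (List.find?_isSome.mpr ⟨c', hc', (PySem.Chars.startswith_iff _ _).mpr hpre⟩)
      · exact pv_no_match_ge l c'.toList (pvCodes_ne_nil c' hc') j hjn hpre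
    have hr : ∀ c' ∈ pvCodes, PySem.Chars.rfind l c'.toList = -1 := fun c' hc' =>
      pv_go_eq_neg l c'.toList l.length (fun k _ => hnone k c' hc')
    have hA := pvA_fold_none l hr
    have hB := pvB_none l l.length (fun j hj => by
      simp only [pvMAt]
      rw [List.find?_eq_none]
      intro c' hc'
      have hnm := hnone j c' hc'
      simpa [PySem.Chars.startswith_iff] using hnm)
    simp only [pvCodes] at hA hB
    rw [hA, hB]
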